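-- pv_equiv track=rewrite | github.com/Sneijderlino/Virtual_Keyboard_Gestur | Virtual_Kyboard_Ghost.py | hit_test
-- ===== SOURCE A (Python) =====
-- keys_layout = [
--     list("1234567890"),
--     list("QWERTYUIOP"),
--     list("ASDFGHJKL;"),
--     list("ZXCVBNM<>?")
-- ]
--
-- special_keys = ["SHIFT", "SPACE", "ENTER", "DEL"]
--
-- def hit_test(ix, iy):
--     for r, row in enumerate(keys_layout):
--         for c, key in enumerate(row):
--             x, y = 100 + c*110, 100 + r*110
--             if (ix - x)**2 + (iy - y)**2 <= 45**2:
--                 return key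
--     x0 = 100
--     for sk in special_keys:
--         if x0 < ix < x0+180 and 550 < iy < 620:
--             return sk
--         x0 += 200
--     return None
-- ===== SOURCE B (Python) =====
-- FLAT_KEYS = list("1234567890QWERTYUIOPASDFGHJKL;ZXCVBNM<>?")
--
-- SPECIAL_KEYS = ["SHIFT", "SPACE", "ENTER", "DEL"]
--
-- def hit_test(ix, iy):
--     # O(1): jump straight to the nearest grid cell, then one distance test.
--     c = (ix - 45) // 110
--     r = (iy - 45) // 110
--     if 0 <= r <= 3 and 0 <= c <= 9 and (ix - (100 + c*110))**2 + (iy - (100 + r*110))**2 <= 2025: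
--         return FLAT_KEYS[r*10 + c]
--     k = (ix - 101) // 200
--     if 0 <= k <= 3 and ix < 280 + 200*k and 550 < iy < 620:
--         return SPECIAL_KEYS[k]
--     return None
-- ===== Notes on version B (the rewrite author's own statement) =====
-- stated objective: alternative
-- what changed: Replaces A's first-match scan over all 40 grid keys and 4 special keys by O(1) arithmetic: compute the nearest grid cell with floor division and do a single distance test (the key discs are disjoint, so the nearest cell is the only possible hit), and locate the special-key slot by floor division instead of walking the list.
import Mathlib
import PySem

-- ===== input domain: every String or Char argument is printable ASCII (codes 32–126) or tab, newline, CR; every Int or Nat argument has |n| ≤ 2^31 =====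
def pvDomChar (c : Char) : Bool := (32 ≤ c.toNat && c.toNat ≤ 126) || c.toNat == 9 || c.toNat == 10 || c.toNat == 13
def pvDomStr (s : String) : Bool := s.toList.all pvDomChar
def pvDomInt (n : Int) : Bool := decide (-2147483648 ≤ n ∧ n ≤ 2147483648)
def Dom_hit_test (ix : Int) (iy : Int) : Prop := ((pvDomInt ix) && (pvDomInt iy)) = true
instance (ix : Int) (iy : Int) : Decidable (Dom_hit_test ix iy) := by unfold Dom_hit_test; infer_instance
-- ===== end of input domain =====

-- B replaces A's first-match scan over all 44 keys by direct index arithmetic: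
-- it computes the nearest grid cell (resp. the special-key slot) and does one distance test.

-- ===== PORT A =====
def krow0 : List String := ["1","2","3","4","5","6","7","8","9","0"]
def krow1 : List String := ["Q","W","E","R","T","Y","U","I","O","P"]
def krow2 : List String := ["A","S","D","F","G","H","J","K","L",";"]
def krow3 : List String := ["Z","X","C","V","B","N","M","<",">","?"]
def keysLayout : List (List String) := [krow0, krow1, krow2, krow3]
def specialKeys : List String := ["SHIFT", "SPACE", "ENTER", "DEL"]

-- inner loop of A: `for c, key in enumerate(row)`, x = 100 + c*110
def rowScan (ix iy y : Int) : Int → List String → Option String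
  | _, [] => none
  | c, key :: rest =>
    if (ix - (100 + c*110))^2 + (iy - y)^2 ≤ 45^2 then some key
    else rowScan ix iy y (c+1) rest

-- outer loop of A: `for r, row in enumerate(keys_layout)`, y = 100 + r*110
def gridScan (ix iy : Int) : Int → List (List String) → Option String
  | _, [] => none
  | r, row :: rest =>
    match rowScan ix iy (100 + r*110) 0 row with
    | some k => some k
    | none => gridScan ix iy (r+1) rest

-- special-keys loop of A: x0 starts at 100 and grows by 200
def specScan (ix iy : Int) : Int → List String → Option String
  | _, [] => none
  | x0, sk :: rest =>
    if x0 < ix ∧ ix < x0 + 180 ∧ 550 < iy ∧ iy < 620 then some sk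
    else specScan ix iy (x0 + 200) rest

def hit_test (ix : Int) (iy : Int) : Option String :=
  match gridScan ix iy 0 keysLayout with
  | some k => some k
  | none => specScan ix iy 100 specialKeys

-- ===== PORT B =====
def flatKeys : List String :=
  ["1","2","3","4","5","6","7","8","9","0",
   "Q","W","E","R","T","Y","U","I","O","P",
   "A","S","D","F","G","H","J","K","L",";",
   "Z","X","C","V","B","N","M","<",">","?"]

def hit_test_alt (ix : Int) (iy : Int) : Option String :=
  let c := PySem.Int.floordiv (ix - 45) 110
  let r := PySem.Int.floordiv (iy - 45) 110
  if 0 ≤ r ∧ r ≤ 3 ∧ 0 ≤ c ∧ c ≤ 9 ∧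
      (ix - (100 + c*110))^2 + (iy - (100 + r*110))^2 ≤ 2025 then
    -- FLAT_KEYS[r*10 + c]; the guard puts the index in range, so pyGetD is exact here
    some (PySem.List.pyGetD flatKeys (r*10 + c) "")
  else
    let k := PySem.Int.floordiv (ix - 101) 200
    if 0 ≤ k ∧ k ≤ 3 ∧ ix < 280 + 200*k ∧ 550 < iy ∧ iy < 620 then
      -- SPECIAL_KEYS[k]; in range by the guard
      some (PySem.List.pyGetD specialKeys k "")
    else none

-- ===== PRECONDITION & SPEC =====
def Spec_hit_test (ix : Int) (iy : Int) (out : Option String) : Prop := out = hit_test_alt ix iy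
instance (ix : Int) (iy : Int) (out : Option String) : Decidable (Spec_hit_test ix iy out) := by unfold Spec_hit_test; infer_instance

-- ===== CLAIM (what is proved, stated in full; the proofs are below) =====
def Claim_equal_hit_test : Prop := ∀ (ix : Int) (iy : Int), Dom_hit_test ix iy → Spec_hit_test ix iy (hit_test ix iy)

-- ===== LEMMAS AND PROOFS =====

-- the disc test for the cell in column c of the row whose centre ordinate is y
abbrev hitC (ix iy y c : Int) : Prop := (ix - (100 + c*110))^2 + (iy - y)^2 ≤ 45^2

lemma hit_bounds {ix iy y c : Int} (h : hitC ix iy y c) :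
    (-45 ≤ ix - (100 + c*110) ∧ ix - (100 + c*110) ≤ 45) ∧
    (-45 ≤ iy - y ∧ iy - y ≤ 45) := by
  refine ⟨⟨?_, ?_⟩, ?_, ?_⟩ <;>
    nlinarith [sq_nonneg (ix - (100 + c*110)), sq_nonneg (iy - y),
      sq_nonneg (ix - (100 + c*110) + 45), sq_nonneg (ix - (100 + c*110) - 45),
      sq_nonneg (iy - y + 45), sq_nonneg (iy - y - 45)]

lemma rowScan_none (ix iy y : Int) (row : List String) (c : Int)
    (h : ∀ j : Int, c ≤ j → j < c + (row.length : Int) → ¬ hitC ix iy y j) :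
    rowScan ix iy y c row = none := by
  induction row generalizing c with
  | nil => rfl
  | cons key rest ih =>
    rw [rowScan, if_neg (h c le_rfl (by simp only [List.length_cons]; push_cast; omega))]
    exact ih (c+1) (fun j h1 h2 => h j (by omega) (by simp at h2 ⊢; omega))

lemma rowScan_hit (ix iy y : Int) (row : List String) (c j : Int)
    (hj0 : 0 ≤ j) (hjl : j < (row.length : Int))
    (hhit : hitC ix iy y (c + j))
    (hmiss : ∀ i : Int, c ≤ i → i < c + j → ¬ hitC ix iy y i) :
    rowScan ix iy y c row = row[j.toNat]? := by
  induction row generalizing c j with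
  | nil => simp at hjl; omega
  | cons key rest ih =>
    by_cases hz : j = 0
    · subst hz
      rw [rowScan, if_pos (by rw [← add_zero c]; exact hhit)]
      simp
    · rw [rowScan, if_neg (hmiss c le_rfl (by omega))]
      have ht : j.toNat = (j-1).toNat + 1 := by omega
      rw [ht, List.getElem?_cons_succ]
      refine ih (c+1) (j-1) (by omega) (by simp at hjl ⊢; omega)
        (by rw [show c + 1 + (j - 1) = c + j by ring]; exact hhit)
        (fun i h1 h2 => hmiss i (by omega) (by omega))

lemma grid_none (ix iy : Int)
    (h : ∀ r c : Int, 0 ≤ r → r ≤ 3 → 0 ≤ c → c ≤ 9 → ¬ hitC ix iy (100 + r*110) c) :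
    gridScan ix iy 0 keysLayout = none := by
  have m0 : rowScan ix iy (100 + 0*110) 0 krow0 = none :=
    rowScan_none _ _ _ _ _ (fun j h1 h2 => by
      refine h 0 j (by norm_num) (by norm_num) h1 ?_; simp [krow0] at h2; omega)
  have m1 : rowScan ix iy (100 + (0+1)*110) 0 krow1 = none :=
    rowScan_none _ _ _ _ _ (fun j h1 h2 => by
      have := h 1 j (by norm_num) (by norm_num) h1 (by simp [krow1] at h2; omega)
      intro hx; apply this; norm_num at hx ⊢; exact hx)
  have m2 : rowScan ix iy (100 + (0+1+1)*110) 0 krow2 = none :=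
    rowScan_none _ _ _ _ _ (fun j h1 h2 => by
      have := h 2 j (by norm_num) (by norm_num) h1 (by simp [krow2] at h2; omega)
      intro hx; apply this; norm_num at hx ⊢; exact hx)
  have m3 : rowScan ix iy (100 + (0+1+1+1)*110) 0 krow3 = none :=
    rowScan_none _ _ _ _ _ (fun j h1 h2 => by
      have := h 3 j (by norm_num) (by norm_num) h1 (by simp [krow3] at h2; omega)
      intro hx; apply this; norm_num at hx ⊢; exact hx)
  simp only [keysLayout, gridScan, m0, m1, m2, m3]

lemma flat_eq (r0 c0 : Int) (h1 : 0 ≤ r0) (h2 : r0 ≤ 3) (h3 : 0 ≤ c0) (h4 : c0 ≤ 9) :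
    ((keysLayout.getD r0.toNat []))[c0.toNat]? = some (PySem.List.pyGetD flatKeys (r0*10 + c0) "") := by
  interval_cases r0 <;> interval_cases c0 <;> rfl

lemma grid_hit (ix iy r0 c0 : Int) (h1 : 0 ≤ r0) (h2 : r0 ≤ 3) (h3 : 0 ≤ c0) (h4 : c0 ≤ 9)
    (hhit : hitC ix iy (100 + r0*110) c0) :
    gridScan ix iy 0 keysLayout = some (PySem.List.pyGetD flatKeys (r0*10 + c0) "") := by
  have hmiss : ∀ r c : Int, (r ≠ r0 ∨ c ≠ c0) → ¬ hitC ix iy (100 + r*110) c := by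
    intro r c hne h'
    have b1 := hit_bounds hhit
    have b2 := hit_bounds h'
    rcases hne with h | h <;> omega
  rw [← flat_eq r0 c0 h1 h2 h3 h4]
  interval_cases r0
  · -- r0 = 0
    have mh : rowScan ix iy (100 + 0*110) 0 krow0 = krow0[c0.toNat]? :=
      rowScan_hit _ _ _ _ 0 c0 h3 (by norm_num [krow0]; omega)
        (by norm_num at hhit ⊢; exact hhit)
        (fun i hi1 hi2 => by
          intro hx; exact hmiss 0 i (Or.inr (by omega)) (by norm_num at hx ⊢; exact hx))
    have hlt : c0.toNat < krow0.length := by simp [krow0]; omega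
    have hsome : krow0[c0.toNat]? = some (krow0[c0.toNat]'hlt) := List.getElem?_eq_getElem hlt
    simp only [keysLayout, gridScan, mh, hsome]
    exact hsome.symm
  · -- r0 = 1
    have m0 : rowScan ix iy (100 + 0*110) 0 krow0 = none :=
      rowScan_none _ _ _ _ _ (fun j h1 h2 => by
        intro hx; exact hmiss 0 j (Or.inl (by norm_num)) (by norm_num at hx ⊢; exact hx))
    have mh : rowScan ix iy (100 + (0+1)*110) 0 krow1 = krow1[c0.toNat]? :=
      rowScan_hit _ _ _ _ 0 c0 h3 (by norm_num [krow1]; omega)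
        (by norm_num at hhit ⊢; exact hhit)
        (fun i hi1 hi2 => by
          intro hx; exact hmiss 1 i (Or.inr (by omega)) (by norm_num at hx ⊢; exact hx))
    have hlt : c0.toNat < krow1.length := by simp [krow1]; omega
    have hsome : krow1[c0.toNat]? = some (krow1[c0.toNat]'hlt) := List.getElem?_eq_getElem hlt
    simp only [keysLayout, gridScan, m0, mh, hsome]
    exact hsome.symm
  · -- r0 = 2
    have m0 : rowScan ix iy (100 + 0*110) 0 krow0 = none :=
      rowScan_none _ _ _ _ _ (fun j h1 h2 => by
        intro hx; exact hmiss 0 j (Or.inl (by norm_num)) (by norm_num at hx ⊢; exact hx))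
    have m1 : rowScan ix iy (100 + (0+1)*110) 0 krow1 = none :=
      rowScan_none _ _ _ _ _ (fun j h1 h2 => by
        intro hx; exact hmiss 1 j (Or.inl (by norm_num)) (by norm_num at hx ⊢; exact hx))
    have mh : rowScan ix iy (100 + (0+1+1)*110) 0 krow2 = krow2[c0.toNat]? :=
      rowScan_hit _ _ _ _ 0 c0 h3 (by norm_num [krow2]; omega)
        (by norm_num at hhit ⊢; exact hhit)
        (fun i hi1 hi2 => by
          intro hx; exact hmiss 2 i (Or.inr (by omega)) (by norm_num at hx ⊢; exact hx))
    have hlt : c0.toNat < krow2.length := by simp [krow2]; omega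
    have hsome : krow2[c0.toNat]? = some (krow2[c0.toNat]'hlt) := List.getElem?_eq_getElem hlt
    simp only [keysLayout, gridScan, m0, m1, mh, hsome]
    exact hsome.symm
  · -- r0 = 3
    have m0 : rowScan ix iy (100 + 0*110) 0 krow0 = none :=
      rowScan_none _ _ _ _ _ (fun j h1 h2 => by
        intro hx; exact hmiss 0 j (Or.inl (by norm_num)) (by norm_num at hx ⊢; exact hx))
    have m1 : rowScan ix iy (100 + (0+1)*110) 0 krow1 = none :=
      rowScan_none _ _ _ _ _ (fun j h1 h2 => by
        intro hx; exact hmiss 1 j (Or.inl (by norm_num)) (by norm_num at hx ⊢; exact hx))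
    have m2 : rowScan ix iy (100 + (0+1+1)*110) 0 krow2 = none :=
      rowScan_none _ _ _ _ _ (fun j h1 h2 => by
        intro hx; exact hmiss 2 j (Or.inl (by norm_num)) (by norm_num at hx ⊢; exact hx))
    have mh : rowScan ix iy (100 + (0+1+1+1)*110) 0 krow3 = krow3[c0.toNat]? :=
      rowScan_hit _ _ _ _ 0 c0 h3 (by norm_num [krow3]; omega)
        (by norm_num at hhit ⊢; exact hhit)
        (fun i hi1 hi2 => by
          intro hx; exact hmiss 3 i (Or.inr (by omega)) (by norm_num at hx ⊢; exact hx))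
    have hlt : c0.toNat < krow3.length := by simp [krow3]; omega
    have hsome : krow3[c0.toNat]? = some (krow3[c0.toNat]'hlt) := List.getElem?_eq_getElem hlt
    simp only [keysLayout, gridScan, m0, m1, m2, mh, hsome]
    exact hsome.symm

lemma grid_eq (ix iy : Int) : gridScan ix iy 0 keysLayout =
    (if 0 ≤ PySem.Int.floordiv (iy - 45) 110 ∧ PySem.Int.floordiv (iy - 45) 110 ≤ 3 ∧
        0 ≤ PySem.Int.floordiv (ix - 45) 110 ∧ PySem.Int.floordiv (ix - 45) 110 ≤ 9 ∧
        (ix - (100 + PySem.Int.floordiv (ix - 45) 110 * 110))^2 +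
          (iy - (100 + PySem.Int.floordiv (iy - 45) 110 * 110))^2 ≤ 2025 then
      some (PySem.List.pyGetD flatKeys (PySem.Int.floordiv (iy - 45) 110 * 10 + PySem.Int.floordiv (ix - 45) 110) "")
    else none) := by
  have hfc : PySem.Int.floordiv (ix - 45) 110 = (ix - 45) / 110 :=
    PySem.Int.floordiv_eq_ediv_of_pos (by norm_num)
  have hfr : PySem.Int.floordiv (iy - 45) 110 = (iy - 45) / 110 :=
    PySem.Int.floordiv_eq_ediv_of_pos (by norm_num)
  rw [hfc, hfr]
  by_cases hB : 0 ≤ (iy - 45) / 110 ∧ (iy - 45) / 110 ≤ 3 ∧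
      0 ≤ (ix - 45) / 110 ∧ (ix - 45) / 110 ≤ 9 ∧
      (ix - (100 + (ix - 45) / 110 * 110))^2 + (iy - (100 + (iy - 45) / 110 * 110))^2 ≤ 2025
  · rw [if_pos hB]
    obtain ⟨h1, h2, h3, h4, h5⟩ := hB
    exact grid_hit ix iy _ _ h1 h2 h3 h4 (by norm_num; exact h5)
  · rw [if_neg hB]
    apply grid_none
    intro r c hr0 hr3 hc0 hc9 hhit
    exfalso; apply hB
    have b := hit_bounds hhit
    have hc : (ix - 45) / 110 = c := by omega
    have hr : (iy - 45) / 110 = r := by omega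
    rw [hc, hr]
    exact ⟨hr0, hr3, hc0, hc9, by have h' := hhit; norm_num at h'; exact h'⟩

lemma spec_eq (ix iy : Int) : specScan ix iy 100 specialKeys =
    (if 0 ≤ PySem.Int.floordiv (ix - 101) 200 ∧ PySem.Int.floordiv (ix - 101) 200 ≤ 3 ∧
        ix < 280 + 200 * PySem.Int.floordiv (ix - 101) 200 ∧ 550 < iy ∧ iy < 620 then
      some (PySem.List.pyGetD specialKeys (PySem.Int.floordiv (ix - 101) 200) "")
    else none) := by
  have hk : PySem.Int.floordiv (ix - 101) 200 = (ix - 101) / 200 :=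
    PySem.Int.floordiv_eq_ediv_of_pos (by norm_num)
  rw [hk]
  norm_num [specScan, specialKeys]
  split_ifs <;>
    first
      | rfl
      | (exfalso; omega)
      | (rw [show ((ix - 101) / 200 : Int) = 0 from by omega]; rfl)
      | (rw [show ((ix - 101) / 200 : Int) = 1 from by omega]; rfl)
      | (rw [show ((ix - 101) / 200 : Int) = 2 from by omega]; rfl)
      | (rw [show ((ix - 101) / 200 : Int) = 3 from by omega]; rfl)

-- ===== VERDICT (by name: the statement is the Claim_ definition above) =====
theorem hit_test_spec : Claim_equal_hit_test := by
  intro ix iy _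
  unfold Spec_hit_test
  show hit_test ix iy = hit_test_alt ix iy
  unfold hit_test hit_test_alt
  rw [grid_eq]
  by_cases hB : 0 ≤ PySem.Int.floordiv (iy - 45) 110 ∧ PySem.Int.floordiv (iy - 45) 110 ≤ 3 ∧
      0 ≤ PySem.Int.floordiv (ix - 45) 110 ∧ PySem.Int.floordiv (ix - 45) 110 ≤ 9 ∧
      (ix - (100 + PySem.Int.floordiv (ix - 45) 110 * 110))^2 +
        (iy - (100 + PySem.Int.floordiv (iy - 45) 110 * 110))^2 ≤ 2025
  · rw [if_pos hB, if_pos hB]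
  · rw [if_neg hB, if_neg hB]
    exact spec_eq ix iy
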